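-- pv_equiv track=rewrite | github.com/neilnyn/tm1py_demo | dimension_update_efficent_demo.py | filter_hierarchy
-- ===== SOURCE A (Python) =====
-- from collections import defaultdict
--
-- def filter_hierarchy(parent_map,element_attributes,root_node):
--     def get_descendants(node):
--         descendants = set()
--         to_process = [node]
--         while to_process:
--             current = to_process.pop()
--             for child in parent_map.get(current, []):
--                 if child not in descendants:
--                     descendants.add(child)
--                     to_process.append(child)
--         return descendants
--     descendants = get_descendants(root_node)
--     descendants.add(root_node)
--
--     filtered_pararent_map = defaultdict(list)
--     filtered_attributes_map = {}
--     for parent, children in parent_map.items():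
--         if parent in descendants:
--             filtered_pararent_map[parent] = children
--             filtered_attributes_map[parent] = element_attributes.get(parent, "")
--             for child in children:
--                 filtered_attributes_map[child] = element_attributes.get(child, "")
--     # transfer filtered_parent_map to tuple list
--     filtered_parent_map_edges = [(parent, child)for parent, children in filtered_pararent_map.items() for child in children]
--
--     return filtered_pararent_map, filtered_parent_map_edges,filtered_attributes_map
-- ===== SOURCE B (Python) =====
-- def filter_hierarchy(parent_map, element_attributes, root_node):
--     # Phase 1: reachable set as a monotone fixpoint: |E|+1 rounds of
--     # "add every child of an already-reached node" are always enough.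
--     bound = sum(len(cs) for cs in parent_map.values())
--     nodes = {root_node}
--     for _ in range(bound + 1):
--         nodes = nodes | {c for p in nodes for c in parent_map.get(p, ())}
--     # Phase 2: one filtered dict, everything else derived from its items.
--     fpm = {p: cs for p, cs in parent_map.items() if p in nodes}
--     edges = [(p, c) for p, cs in fpm.items() for c in cs]
--     attrs = {n: element_attributes.get(n, "")
--              for p, cs in fpm.items() for n in [p, *cs]}
--     return fpm, edges, attrs
-- ===== Notes on version B (the rewrite author's own statement) =====
-- stated objective: alternative
-- what changed: Replaces the explicit-stack DFS with a rounds-based monotone fixpoint computation of the reachable set (|E|+1 saturation rounds), and rebuilds phase 2 declaratively: one filtered dict comprehension whose items drive the edge list and the attribute dict, instead of a single loop maintaining a defaultdict and an attributes dict side by side; the Lean-level precondition only excludes association lists with duplicate keys, which do not encode any Python dict.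
import Mathlib
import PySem

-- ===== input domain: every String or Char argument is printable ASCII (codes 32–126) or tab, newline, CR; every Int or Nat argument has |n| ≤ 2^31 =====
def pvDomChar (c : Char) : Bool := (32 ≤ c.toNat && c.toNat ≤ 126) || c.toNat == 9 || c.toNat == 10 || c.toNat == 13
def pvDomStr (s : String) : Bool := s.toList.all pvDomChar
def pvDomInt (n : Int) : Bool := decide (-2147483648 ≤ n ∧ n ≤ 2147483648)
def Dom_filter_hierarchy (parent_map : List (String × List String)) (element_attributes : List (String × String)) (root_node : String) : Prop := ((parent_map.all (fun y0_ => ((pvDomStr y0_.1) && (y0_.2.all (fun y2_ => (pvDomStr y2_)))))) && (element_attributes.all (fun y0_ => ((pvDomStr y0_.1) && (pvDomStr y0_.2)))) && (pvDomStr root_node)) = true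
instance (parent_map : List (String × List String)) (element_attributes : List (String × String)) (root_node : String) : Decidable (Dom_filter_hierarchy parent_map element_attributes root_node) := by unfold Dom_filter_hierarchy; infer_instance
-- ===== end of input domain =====

-- B replaces A's explicit-stack DFS by a rounds-based monotone fixpoint of the reachable
-- set and derives the three outputs from one filtered dict; no argument is mutated.

-- ===== PORT A =====
-- inner 'for child in parent_map.get(current, []):' loop of get_descendants;
-- state = (descendants, to_process) with the stack stored top-first (append = cons, pop = head)
def aPush (st : PySem.Set String × List String) (children : List String) :
    PySem.Set String × List String :=
  children.foldl (fun st child =>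
    if child ∈ st.1 then st else (PySem.Set.add st.1 child, child :: st.2)) st

-- shape of one inner loop: it appends a block t of fresh children to descendants and
-- pushes exactly that block on the stack (needed to justify termination of the while loop)
theorem aPush_spec (children : List String) (d : PySem.Set String) (s : List String)
    (hnd : d.Nodup) :
    ∃ t, aPush (d, s) children = (d ++ t, t.reverse ++ s) ∧ (d ++ t).Nodup ∧
      (∀ x ∈ t, x ∈ children) ∧ (∀ c ∈ children, c ∈ d ∨ c ∈ t) := by
  induction children generalizing d s with
  | nil => exact ⟨[], by simp [aPush], by simpa using hnd, by simp, by simp⟩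
  | cons c cs ih =>
    by_cases hc : c ∈ d
    · obtain ⟨t, he, h1, h2, h3⟩ := ih d s hnd
      refine ⟨t, ?_, h1, fun x hx => List.mem_cons_of_mem _ (h2 x hx), ?_⟩
      · rw [← he]; simp [aPush, hc]
      · intro x hx
        rcases List.mem_cons.mp hx with hx | hx
        · exact .inl (hx ▸ hc)
        · exact h3 x hx
    · have hnd' : (d ++ [c]).Nodup := by
        rw [List.nodup_append]
        refine ⟨hnd, List.nodup_singleton _, ?_⟩
        intro a ha b hb
        rw [List.mem_singleton] at hb
        subst hb
        exact fun h => hc (h ▸ ha)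
      obtain ⟨t, he, h1, h2, h3⟩ := ih (d ++ [c]) (c :: s) hnd'
      refine ⟨c :: t, ?_, by simpa using h1, ?_, ?_⟩
      · have hstep : aPush (d, s) (c :: cs) = aPush (PySem.Set.add d c, c :: s) cs := by
          simp [aPush, hc]
        rw [hstep, PySem.Set.add_of_not_mem hc, he]
        simp
      · intro x hx
        rcases List.mem_cons.mp hx with hx | hx
        · exact hx ▸ List.mem_cons_self ..
        · exact List.mem_cons_of_mem _ (h2 x hx)
      · intro x hx
        rcases List.mem_cons.mp hx with hx | hx
        · exact .inr (hx ▸ List.mem_cons_self ..)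
        · rcases h3 x hx with h | h
          · rcases List.mem_append.mp h with h | h
            · exact .inl h
            · exact .inr (List.mem_cons.mpr (.inl (by simpa using h)))
          · exact .inr (List.mem_cons_of_mem _ h)

-- the while loop of get_descendants; U is a ghost list (every child name of parent_map)
-- carried, with the two invariants, only to justify termination — it never affects the value
def aLoop (pm : PySem.Dict String (List String)) (U : List String)
    (desc : PySem.Set String) (stack : List String)
    (hnd : desc.Nodup) (hsub : ∀ x ∈ desc, x ∈ U)
    (hpm : ∀ p, ∀ c ∈ pm.getD p [], c ∈ U) : PySem.Set String :=
  match stack with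
  | [] => desc
  | current :: rest =>
    aLoop pm U (aPush (desc, rest) (pm.getD current [])).1
      (aPush (desc, rest) (pm.getD current [])).2
      (by
        obtain ⟨t, he, h1, _, _⟩ := aPush_spec (pm.getD current []) desc rest hnd
        rw [he]; exact h1)
      (by
        obtain ⟨t, he, _, h2, _⟩ := aPush_spec (pm.getD current []) desc rest hnd
        rw [he]; intro x hx
        rcases List.mem_append.mp hx with h | h
        · exact hsub x h
        · exact hpm current x (h2 x h))
      hpm
termination_by 2 * (U.length - desc.length) + stack.length
decreasing_by
  obtain ⟨t, he, h1, h2, _⟩ := aPush_spec (pm.getD current []) desc rest hnd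
  rw [he]
  have hlen : desc.length + t.length ≤ U.length := by
    have hsubU : (desc ++ t).length ≤ U.length := by
      apply List.Subperm.length_le
      apply List.subperm_of_subset h1
      intro x hx
      rcases List.mem_append.mp hx with h | h
      · exact hsub x h
      · exact hpm current x (h2 x h)
    simpa using hsubU
  simp only [List.length_append, List.length_reverse, List.length_cons]
  omega

-- every child stored in (Dict.mk l) occurs in the flattening of l's value lists
theorem getD_mk_mem_flatMap (l : List (String × List String)) (p c : String)
    (h : c ∈ (PySem.Dict.mk l).getD p []) : c ∈ l.flatMap (fun pc => pc.2) := by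
  induction l with
  | nil =>
    rw [PySem.Dict.getD_eq_get?_getD] at h
    simp [PySem.Dict.get?] at h
  | cons hd tl ih =>
    rw [PySem.Dict.getD_eq_get?_getD] at h
    rcases hd with ⟨k, v⟩
    rw [PySem.Dict.get?_mk_cons] at h
    simp only [List.flatMap_cons, List.mem_append]
    by_cases hk : (k == p) = true
    · simp [hk] at h
      exact .inl (by simpa using h)
    · simp [hk] at h
      exact .inr (ih (by rw [PySem.Dict.getD_eq_get?_getD]; exact h))

def filter_hierarchy (parent_map : List (String × List String)) (element_attributes : List (String × String)) (root_node : String) : (List (String × List String)) × (List (String × String)) × (List (String × String)) :=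
  let pm : PySem.Dict String (List String) := PySem.Dict.mk parent_map
  let ea : PySem.Dict String String := PySem.Dict.mk element_attributes
  let U : List String := parent_map.flatMap (fun pc => pc.2)
  let descendants :=
    aLoop pm U PySem.Set.empty [root_node] (by simp [PySem.Set.empty]) (by simp [PySem.Set.empty])
      (fun p c hc => getD_mk_mem_flatMap parent_map p c hc)
  let desc2 := PySem.Set.add descendants root_node
  let st := parent_map.foldl (fun st pc =>
      if PySem.Set.contains desc2 pc.1 then
        (st.1.insert pc.1 pc.2,
         pc.2.foldl (fun fam child => fam.insert child (ea.getD child ""))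
           (st.2.insert pc.1 (ea.getD pc.1 "")))
      else st)
    (PySem.Dict.empty, PySem.Dict.empty)
  let edges := st.1.items.flatMap (fun pc => pc.2.map (fun c => (pc.1, c)))
  (st.1.items, edges, st.2.items)

-- ===== PORT B =====
-- one saturation round: nodes | {c for p in nodes for c in parent_map.get(p, ())}
def bStep (pm : PySem.Dict String (List String)) (s : PySem.Set String) : PySem.Set String :=
  s.foldl (fun acc p => (pm.getD p []).foldl PySem.Set.add acc) s

def bIter (pm : PySem.Dict String (List String)) : Nat → PySem.Set String → PySem.Set String
  | 0, s => s
  | n + 1, s => bIter pm n (bStep pm s)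

def filter_hierarchy_alt (parent_map : List (String × List String)) (element_attributes : List (String × String)) (root_node : String) : (List (String × List String)) × (List (String × String)) × (List (String × String)) :=
  let pm : PySem.Dict String (List String) := PySem.Dict.mk parent_map
  let bound := (pm.values.map List.length).sum
  let nodes := bIter pm (bound + 1) (PySem.Set.add PySem.Set.empty root_node)
  let fpm := (parent_map.filter (fun pc => PySem.Set.contains nodes pc.1)).foldl
      (fun d pc => d.insert pc.1 pc.2) PySem.Dict.empty
  let edges := fpm.items.flatMap (fun pc => pc.2.map (fun c => (pc.1, c)))
  let ea : PySem.Dict String String := PySem.Dict.mk element_attributes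
  let attrs := fpm.items.foldl (fun d pc =>
      (pc.1 :: pc.2).foldl (fun d n => d.insert n (ea.getD n "")) d) PySem.Dict.empty
  (fpm.items, edges, attrs.items)

-- ===== PRECONDITION & SPEC =====
-- Pre_ excludes only association lists whose keys repeat: a Python dict cannot have
-- duplicate keys, so such lists encode no input the Python function ever receives.
def Pre_filter_hierarchy (parent_map : List (String × List String)) (element_attributes : List (String × String)) (root_node : String) : Prop :=
  (parent_map.map (fun pc => pc.1)).Nodup
instance (parent_map : List (String × List String)) (element_attributes : List (String × String)) (root_node : String) : Decidable (Pre_filter_hierarchy parent_map element_attributes root_node) := by unfold Pre_filter_hierarchy; infer_instance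

def pvWitness_filter_hierarchy : (List (String × List String)) × (List (String × String)) × String :=
  ([("r", ["a", "b"]), ("a", ["b"])], [("a", "x")], "r")

def Spec_filter_hierarchy (parent_map : List (String × List String)) (element_attributes : List (String × String)) (root_node : String) (out : (List (String × List String)) × (List (String × String)) × (List (String × String))) : Prop := out = filter_hierarchy_alt parent_map element_attributes root_node
instance (parent_map : List (String × List String)) (element_attributes : List (String × String)) (root_node : String) (out : (List (String × List String)) × (List (String × String)) × (List (String × String))) : Decidable (Spec_filter_hierarchy parent_map element_attributes root_node out) := by unfold Spec_filter_hierarchy; infer_instance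

-- ===== CLAIM (what is proved, stated in full; the proofs are below) =====
def Claim_equal_filter_hierarchy : Prop := ∀ (parent_map : List (String × List String)) (element_attributes : List (String × String)) (root_node : String), Dom_filter_hierarchy parent_map element_attributes root_node → Pre_filter_hierarchy parent_map element_attributes root_node → Spec_filter_hierarchy parent_map element_attributes root_node (filter_hierarchy parent_map element_attributes root_node)

-- ===== LEMMAS AND PROOFS =====

-- reachability along parent_map edges, starting strictly below root
inductive PvReach (pm : PySem.Dict String (List String)) (root : String) : String → Prop
  | base {c} : c ∈ pm.getD root [] → PvReach pm root c
  | step {p c} : PvReach pm root p → c ∈ pm.getD p [] → PvReach pm root c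

-- "root or reachable": the intended membership of both final node sets
def PvG (pm : PySem.Dict String (List String)) (root : String) (x : String) : Prop :=
  x = root ∨ PvReach pm root x

theorem pvG_child {pm : PySem.Dict String (List String)} {root p c : String}
    (hp : PvG pm root p) (hc : c ∈ pm.getD p []) : PvReach pm root c := by
  rcases hp with h | h
  · exact .base (h ▸ hc)
  · exact .step h hc

theorem reach_mem_of_closed {pm : PySem.Dict String (List String)} {root x : String}
    {A : List String} (h : PvReach pm root x)
    (C : ∀ p, (p = root ∨ p ∈ A) → ∀ c ∈ pm.getD p [], c ∈ A) : x ∈ A := by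
  induction h with
  | base hc => exact C root (.inl rfl) _ hc
  | step _ hc ih => exact C _ (.inr ih) _ hc

theorem aLoop_subG (pm : PySem.Dict String (List String)) (U : List String)
    (desc : PySem.Set String) (stack : List String) (hnd hsub hpm) (root : String) :
    (∀ y ∈ stack, PvG pm root y) → (∀ y ∈ desc, PvG pm root y) →
    ∀ x ∈ aLoop pm U desc stack hnd hsub hpm, PvG pm root x := by
  fun_induction aLoop with
  | case1 desc hnd hsub =>
    intro _ Hd
    exact Hd
  | case2 desc hnd hsub current rest ih =>
    intro Hs Hd
    obtain ⟨t, he, _, h2, _⟩ := aPush_spec (pm.getD current []) desc rest hnd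
    have htG : ∀ y ∈ t, PvG pm root y := by
      intro y hy
      exact .inr (pvG_child (Hs current (.head _)) (h2 y hy))
    refine ih ?_ ?_
    · rw [he]; intro y hy
      rcases List.mem_append.mp hy with h | h
      · exact htG y (List.mem_reverse.mp h)
      · exact Hs y (.tail _ h)
    · rw [he]; intro y hy
      rcases List.mem_append.mp hy with h | h
      · exact Hd y h
      · exact htG y h

theorem aLoop_closed (pm : PySem.Dict String (List String)) (U : List String)
    (desc : PySem.Set String) (stack : List String) (hnd hsub hpm) (root : String) :
    (∀ p, (p = root ∨ p ∈ desc) → p ∈ stack ∨ ∀ c ∈ pm.getD p [], c ∈ desc) →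
    ∀ p, (p = root ∨ p ∈ aLoop pm U desc stack hnd hsub hpm) →
      ∀ c ∈ pm.getD p [], c ∈ aLoop pm U desc stack hnd hsub hpm := by
  fun_induction aLoop with
  | case1 desc hnd hsub =>
    intro Hinv p hp c hc
    rcases Hinv p hp with h | h
    · simp at h
    · exact h c hc
  | case2 desc hnd hsub current rest ih =>
    intro Hinv
    obtain ⟨t, he, _, h2, h3⟩ := aPush_spec (pm.getD current []) desc rest hnd
    refine ih ?_
    intro p hp
    rw [he] at hp ⊢
    simp only at hp
    have hcur : p = current → (∀ c ∈ pm.getD p [], c ∈ desc ++ t) := by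
      rintro rfl c hc
      rcases h3 c hc with hh | hh
      · exact List.mem_append.mpr (.inl hh)
      · exact List.mem_append.mpr (.inr hh)
    have hold : (p = root ∨ p ∈ desc) → p ∈ List.reverse t ++ rest ∨ ∀ c ∈ pm.getD p [], c ∈ desc ++ t := by
      intro hpd
      rcases Hinv p hpd with h | h
      · rcases List.mem_cons.mp h with h | h
        · exact .inr (hcur h)
        · exact .inl (List.mem_append.mpr (.inr h))
      · exact .inr (fun c hc => List.mem_append.mpr (.inl (h c hc)))
    rcases hp with hp | hp
    · exact hold (.inl hp)
    · rcases List.mem_append.mp hp with hp | hp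
      · exact hold (.inr hp)
      · exact .inl (List.mem_append.mpr (.inl (List.mem_reverse.mpr hp)))

-- ---- B side ----

theorem mem_foldl_update (pm : PySem.Dict String (List String)) (l : List String)
    (a : PySem.Set String) (y : String) :
    y ∈ l.foldl (fun acc p => PySem.Set.update acc (pm.getD p [])) a ↔
      y ∈ a ∨ ∃ p ∈ l, y ∈ pm.getD p [] := by
  induction l generalizing a with
  | nil => simp
  | cons h t ih =>
    rw [List.foldl_cons, ih, PySem.Set.mem_update]
    simp only [List.exists_mem_cons_iff]
    tauto

theorem bStep_eq (pm : PySem.Dict String (List String)) (s : PySem.Set String) :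
    bStep pm s = s.foldl (fun acc p => PySem.Set.update acc (pm.getD p [])) s := rfl

theorem mem_bStep (pm : PySem.Dict String (List String)) (s : PySem.Set String) (y : String) :
    y ∈ bStep pm s ↔ y ∈ s ∨ ∃ p ∈ s, y ∈ pm.getD p [] := by
  rw [bStep_eq, mem_foldl_update]

theorem foldl_add_extend (xs : List String) (a : PySem.Set String) :
    ∃ t, xs.foldl PySem.Set.add a = a ++ t := by
  induction xs generalizing a with
  | nil => exact ⟨[], by simp⟩
  | cons x xs ih =>
    rw [List.foldl_cons]
    obtain ⟨t, ht⟩ := ih (a.add x)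
    rw [ht, PySem.Set.add_eq_ite]
    split
    · exact ⟨t, rfl⟩
    · exact ⟨x :: t, by simp⟩

theorem bStep_extend (pm : PySem.Dict String (List String)) (s : PySem.Set String) :
    ∃ t, bStep pm s = s ++ t := by
  suffices h : ∀ (l : List String) (a : PySem.Set String),
      ∃ t, l.foldl (fun acc p => (pm.getD p []).foldl PySem.Set.add acc) a = a ++ t by
    exact h s s
  intro l
  induction l with
  | nil => exact fun a => ⟨[], by simp⟩
  | cons x xs ih =>
    intro a
    rw [List.foldl_cons]
    obtain ⟨t0, ht0⟩ := foldl_add_extend (pm.getD x []) a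
    obtain ⟨t1, ht1⟩ := ih ((pm.getD x []).foldl PySem.Set.add a)
    rw [ht1, ht0]
    exact ⟨t0 ++ t1, by simp⟩

theorem nodup_foldl_add (xs : List String) (a : PySem.Set String) (h : a.Nodup) :
    (xs.foldl PySem.Set.add a).Nodup := by
  induction xs generalizing a with
  | nil => exact h
  | cons x xs ih => exact ih _ (PySem.Set.nodup_add a x h)

theorem nodup_bStep (pm : PySem.Dict String (List String)) (s : PySem.Set String)
    (h : s.Nodup) : (bStep pm s).Nodup := by
  suffices hgen : ∀ (l : List String) (a : PySem.Set String), a.Nodup →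
      (l.foldl (fun acc p => (pm.getD p []).foldl PySem.Set.add acc) a).Nodup by
    exact hgen s s h
  intro l
  induction l with
  | nil => exact fun a ha => ha
  | cons x xs ih => exact fun a ha => ih _ (nodup_foldl_add _ _ ha)

theorem bIter_fix (pm : PySem.Dict String (List String)) (s : PySem.Set String)
    (h : bStep pm s = s) : ∀ n, bIter pm n s = s := by
  intro n
  induction n with
  | zero => rfl
  | succ n ih => rw [bIter, h, ih]

theorem bIter_mono (pm : PySem.Dict String (List String)) :
    ∀ (n : Nat) (s : PySem.Set String), ∀ x ∈ s, x ∈ bIter pm n s := by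
  intro n
  induction n with
  | zero => exact fun s x hx => hx
  | succ n ih =>
    intro s x hx
    rw [bIter]
    obtain ⟨t, ht⟩ := bStep_extend pm s
    exact ih _ x (by rw [ht]; exact List.mem_append.mpr (.inl hx))

theorem bIter_subG (pm : PySem.Dict String (List String)) (root : String) :
    ∀ (n : Nat) (s : PySem.Set String), (∀ y ∈ s, PvG pm root y) →
      ∀ y ∈ bIter pm n s, PvG pm root y := by
  intro n
  induction n with
  | zero => exact fun s hs => hs
  | succ n ih =>
    intro s hs
    rw [bIter]
    refine ih _ ?_
    intro y hy
    rcases (mem_bStep pm s y).mp hy with h | ⟨p, hp, hc⟩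
    · exact hs y h
    · exact .inr (pvG_child (hs p hp) hc)

theorem bIter_saturates (pm : PySem.Dict String (List String)) (V : List String)
    (hpm : ∀ p c, c ∈ pm.getD p [] → c ∈ V) :
    ∀ (n : Nat) (s : PySem.Set String), s.Nodup → (∀ x ∈ s, x ∈ V) →
      V.length + 1 ≤ n + s.length → bStep pm (bIter pm n s) = bIter pm n s := by
  intro n
  induction n with
  | zero =>
    intro s hnd hsub hlen
    exfalso
    have : s.length ≤ V.length := List.Subperm.length_le (List.subperm_of_subset hnd hsub)
    omega
  | succ n ih =>
    intro s hnd hsub hlen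
    by_cases hf : bStep pm s = s
    · rw [bIter, hf, bIter_fix pm s hf n, hf]
    · rw [bIter]
      obtain ⟨t, ht⟩ := bStep_extend pm s
      have htne : t ≠ [] := by
        intro h0; exact hf (by rw [ht, h0, List.append_nil])
      refine ih (bStep pm s) (nodup_bStep pm s hnd) ?_ ?_
      · intro x hx
        rcases (mem_bStep pm s x).mp hx with h | ⟨p, _, hc⟩
        · exact hsub x h
        · exact hpm p x hc
      · have : s.length + 1 ≤ (bStep pm s).length := by
          rw [ht, List.length_append]
          have : 0 < t.length := List.length_pos_of_ne_nil htne
          omega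
        omega

theorem fix_closed (pm : PySem.Dict String (List String)) (s : PySem.Set String)
    (h : bStep pm s = s) : ∀ p ∈ s, ∀ c ∈ pm.getD p [], c ∈ s := by
  intro p hp c hc
  rw [← h]
  exact (mem_bStep pm s c).mpr (.inr ⟨p, hp, hc⟩)


-- ---- membership characterizations of the two final node sets ----

theorem A_mem (pm : PySem.Dict String (List String)) (U : List String) (root : String)
    (hnd hsub hpm) (x : String) :
    x ∈ PySem.Set.add (aLoop pm U PySem.Set.empty [root] hnd hsub hpm) root ↔ PvG pm root x := by
  constructor
  · intro hx
    rcases (PySem.Set.mem_add _ _ _).mp hx with h | h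
    · refine aLoop_subG pm U _ _ hnd hsub hpm root ?_ ?_ x h
      · intro y hy
        rw [List.mem_singleton] at hy
        exact .inl hy
      · intro y hy
        simp [PySem.Set.empty] at hy
    · exact .inl h
  · intro hx
    rcases hx with h | h
    · exact (PySem.Set.mem_add _ _ _).mpr (.inr h)
    · refine (PySem.Set.mem_add _ _ _).mpr (.inl ?_)
      refine reach_mem_of_closed h (aLoop_closed pm U _ _ hnd hsub hpm root ?_)
      intro p hp
      rcases hp with hp | hp
      · exact .inl (hp ▸ List.mem_singleton_self _)
      · simp [PySem.Set.empty] at hp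

theorem B_mem (parent_map : List (String × List String)) (root x : String) :
    x ∈ bIter (PySem.Dict.mk parent_map)
        ((((PySem.Dict.mk parent_map).values.map List.length).sum) + 1)
        (PySem.Set.add PySem.Set.empty root) ↔
      PvG (PySem.Dict.mk parent_map) root x := by
  have hs0 : PySem.Set.add PySem.Set.empty root = [root] := by
    rw [PySem.Set.add_eq_ite]
    simp [PySem.Set.empty]
  have hpmV : ∀ p c, c ∈ (PySem.Dict.mk parent_map).getD p [] →
      c ∈ root :: parent_map.flatMap (fun pc => pc.2) :=
    fun p c hc => List.mem_cons_of_mem _ (getD_mk_mem_flatMap parent_map p c hc)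
  have hVlen : (root :: parent_map.flatMap (fun pc => pc.2)).length =
      (((PySem.Dict.mk parent_map).values.map List.length).sum) + 1 := by
    simp [List.length_flatMap, PySem.Dict.values, List.map_map, Function.comp_def]
  have hfix : bStep (PySem.Dict.mk parent_map)
      (bIter (PySem.Dict.mk parent_map) ((((PySem.Dict.mk parent_map).values.map List.length).sum) + 1) [root]) =
      bIter (PySem.Dict.mk parent_map) ((((PySem.Dict.mk parent_map).values.map List.length).sum) + 1) [root] := by
    refine bIter_saturates (PySem.Dict.mk parent_map) _ hpmV _ [root] (List.nodup_singleton _) ?_ ?_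
    · intro y hy
      rw [List.mem_singleton] at hy
      exact hy ▸ List.mem_cons_self ..
    · rw [hVlen]
      simp
  rw [hs0]
  constructor
  · refine bIter_subG _ root _ [root] ?_ x
    intro y hy
    rw [List.mem_singleton] at hy
    exact .inl hy
  · intro hx
    have hproot : root ∈ bIter (PySem.Dict.mk parent_map) ((((PySem.Dict.mk parent_map).values.map List.length).sum) + 1) [root] :=
      bIter_mono _ _ [root] root (List.mem_singleton_self _)
    rcases hx with h | h
    · exact h ▸ hproot
    · refine reach_mem_of_closed h ?_
      intro p hp c hc
      rcases hp with hp | hp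
      · exact fix_closed _ _ hfix p (hp ▸ hproot) c hc
      · exact fix_closed _ _ hfix p hp c hc

theorem contains_congr (s t : PySem.Set String) (h : ∀ y, y ∈ s ↔ y ∈ t) (x : String) :
    s.contains x = t.contains x := by
  by_cases hx : x ∈ s
  · rw [(PySem.Set.contains_iff s x).mpr hx, (PySem.Set.contains_iff t x).mpr ((h x).mp hx)]
  · have h1 : s.contains x = false := by
      rw [Bool.eq_false_iff]
      intro hh
      exact hx ((PySem.Set.contains_iff s x).mp hh)
    have h2 : t.contains x = false := by
      rw [Bool.eq_false_iff]
      intro hh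
      exact hx ((h x).mpr ((PySem.Set.contains_iff t x).mp hh))
    rw [h1, h2]

-- ---- phase 2: A's single combined loop equals B's derived-from-one-dict form ----

theorem phase2 (parent_map : List (String × List String)) (ea : PySem.Dict String String)
    (s t : PySem.Set String) (hmem : ∀ y, y ∈ s ↔ y ∈ t)
    (hpre : (parent_map.map (fun pc => pc.1)).Nodup) :
    ((parent_map.foldl (fun st pc =>
        if PySem.Set.contains s pc.1 then
          (st.1.insert pc.1 pc.2,
           pc.2.foldl (fun fam child => fam.insert child (ea.getD child ""))
             (st.2.insert pc.1 (ea.getD pc.1 "")))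
        else st) (PySem.Dict.empty, PySem.Dict.empty)).1.items,
     (parent_map.foldl (fun st pc =>
        if PySem.Set.contains s pc.1 then
          (st.1.insert pc.1 pc.2,
           pc.2.foldl (fun fam child => fam.insert child (ea.getD child ""))
             (st.2.insert pc.1 (ea.getD pc.1 "")))
        else st) (PySem.Dict.empty, PySem.Dict.empty)).1.items.flatMap
          (fun pc => pc.2.map (fun c => (pc.1, c))),
     (parent_map.foldl (fun st pc =>
        if PySem.Set.contains s pc.1 then
          (st.1.insert pc.1 pc.2,
           pc.2.foldl (fun fam child => fam.insert child (ea.getD child ""))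
             (st.2.insert pc.1 (ea.getD pc.1 "")))
        else st) (PySem.Dict.empty, PySem.Dict.empty)).2.items) =
    (((parent_map.filter (fun pc => PySem.Set.contains t pc.1)).foldl
        (fun d pc => d.insert pc.1 pc.2) PySem.Dict.empty).items,
     ((parent_map.filter (fun pc => PySem.Set.contains t pc.1)).foldl
        (fun d pc => d.insert pc.1 pc.2) PySem.Dict.empty).items.flatMap
          (fun pc => pc.2.map (fun c => (pc.1, c))),
     (((parent_map.filter (fun pc => PySem.Set.contains t pc.1)).foldl
        (fun d pc => d.insert pc.1 pc.2) PySem.Dict.empty).items.foldl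
        (fun d pc => (pc.1 :: pc.2).foldl (fun d n => d.insert n (ea.getD n "")) d)
        PySem.Dict.empty).items) := by
  have hc : ∀ pc : String × List String, PySem.Set.contains s pc.1 = PySem.Set.contains t pc.1 :=
    fun pc => contains_congr s t hmem pc.1
  have e1 : parent_map.foldl (fun st pc =>
        if PySem.Set.contains s pc.1 then
          ((st.1.insert pc.1 pc.2 : PySem.Dict String (List String)),
           pc.2.foldl (fun fam child => fam.insert child (ea.getD child ""))
             ((st.2.insert pc.1 (ea.getD pc.1 "") : PySem.Dict String String)))
        else st) (PySem.Dict.empty, PySem.Dict.empty) =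
      parent_map.foldl (fun st pc =>
        ((if PySem.Set.contains t pc.1 then st.1.insert pc.1 pc.2 else st.1),
         (if PySem.Set.contains t pc.1 then
            pc.2.foldl (fun fam child => fam.insert child (ea.getD child ""))
              (st.2.insert pc.1 (ea.getD pc.1 "")) else st.2)))
        (PySem.Dict.empty, PySem.Dict.empty) := by
    refine PySem.List.foldl_congr_mem _ _ _ _ ?_
    intro acc x hx
    rw [hc x]
    by_cases h : x.1 ∈ t
    · simp [h]
    · simp [h]
  rw [e1, PySem.List.foldl_prod_mk
      (f := fun (d : PySem.Dict String (List String)) (pc : String × List String) =>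
        if PySem.Set.contains t pc.1 = true then d.insert pc.1 pc.2 else d)
      (g := fun (d : PySem.Dict String String) (pc : String × List String) =>
        if PySem.Set.contains t pc.1 = true then
          pc.2.foldl (fun fam child => fam.insert child (ea.getD child ""))
            (d.insert pc.1 (ea.getD pc.1 "")) else d),
    PySem.List.foldl_if_eq_foldl_filter, PySem.List.foldl_if_eq_foldl_filter]
  have hitems : ((parent_map.filter (fun pc => PySem.Set.contains t pc.1)).foldl
      (fun d pc => d.insert pc.1 pc.2) (PySem.Dict.empty : PySem.Dict String (List String))).items =
      parent_map.filter (fun pc => PySem.Set.contains t pc.1) := by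
    have hk : ((parent_map.filter (fun pc => PySem.Set.contains t pc.1)).map (fun pc => pc.1)).Nodup := by
      refine List.Nodup.sublist (List.Sublist.map _ List.filter_sublist) hpre
    have := PySem.Dict.items_foldl_insert_fresh
      (parent_map.filter (fun pc => PySem.Set.contains t pc.1))
      (fun pc => pc.1) (fun pc => pc.2) PySem.Dict.empty
      (by intro a _; simp) hk
    simpa using this
  refine congrArg₂ Prod.mk rfl (congrArg₂ Prod.mk rfl ?_)
  rw [hitems]
  rfl

-- ===== VERDICT (by name: the statement is the Claim_ definition above) =====
theorem filter_hierarchy_spec : Claim_equal_filter_hierarchy := by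
  intro parent_map element_attributes root_node _ hpre
  unfold Spec_filter_hierarchy filter_hierarchy filter_hierarchy_alt
  refine phase2 parent_map (PySem.Dict.mk element_attributes) _ _ ?_ hpre
  intro y
  exact (A_mem _ _ root_node _ _ _ y).trans (B_mem parent_map root_node y).symm
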